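-- pv_equiv track=rewrite | github.com/Gilgo2/LLMTokenAuctions | utils.py | find_last_mentioned_company
-- ===== SOURCE A (Python) =====
-- def find_last_mentioned_company(ad, company_names):
--     last_company_name = ""
--     last_company_name_index = -1
--     for name in company_names:
--         index = ad.find(name)
--         if index > last_company_name_index:
--             last_company_name = name
--             last_company_name_index = index
--     return last_company_name, last_company_name_index
-- ===== SOURCE B (Python) =====
-- def find_last_mentioned_company(ad, company_names):
--     # Single left-to-right scan of the ad: at each position i, the names whose
--     # first occurrence is exactly i overwrite the answer and leave the pool.
--     remaining = list(company_names)
--     best_name, best_index = "", -1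
--     for i in range(len(ad) + 1):
--         if not remaining:
--             break
--         hits = [n for n in remaining if ad.startswith(n, i)]
--         if hits:
--             best_name, best_index = hits[0], i
--             remaining = [n for n in remaining if n not in hits]
--     return best_name, best_index
-- ===== Notes on version B (the rewrite author's own statement) =====
-- stated objective: alternative
-- what changed: A scans the whole ad once per name via ad.find(name) and keeps a running strict-max fold over the names; B instead makes a single left-to-right pass over the ad's positions, at each position removing from the pool the names whose first occurrence is exactly there (so the last recorded hit is the answer), with an early exit once every name has been found.
import Mathlib
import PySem

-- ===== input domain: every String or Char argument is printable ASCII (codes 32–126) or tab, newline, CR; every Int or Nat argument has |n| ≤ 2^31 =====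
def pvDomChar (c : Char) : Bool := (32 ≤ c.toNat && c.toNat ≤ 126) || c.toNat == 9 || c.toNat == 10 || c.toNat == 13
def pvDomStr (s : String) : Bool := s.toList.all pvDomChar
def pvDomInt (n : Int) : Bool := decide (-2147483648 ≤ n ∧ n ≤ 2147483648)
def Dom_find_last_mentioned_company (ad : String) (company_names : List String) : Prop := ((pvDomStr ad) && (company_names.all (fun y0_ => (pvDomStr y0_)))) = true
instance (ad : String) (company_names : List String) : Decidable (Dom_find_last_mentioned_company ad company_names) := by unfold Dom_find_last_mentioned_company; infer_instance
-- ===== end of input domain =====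

-- B replaces the per-name `ad.find(name)` scans by a single left-to-right scan of the
-- ad's positions, recording names at their first occurrence (objective: alternative).

-- ===== PORT A =====
def pvStepA (ad : String) (b : String × Int) (name : String) : String × Int :=
  let index := PySem.Str.find ad name
  if index > b.2 then (name, index) else b

def find_last_mentioned_company (ad : String) (company_names : List String) : String × Int :=
  List.foldl (pvStepA ad) ("", -1) company_names

-- ===== PORT B =====
-- `ad.startswith(n, i)` is ported as `PySem.Chars.startswith (ad.toList.drop i.toNat) n.toList`,
-- exact for the nonnegative i produced by range(len(ad) + 1).
def pvBLoop (ad : String) (is_ : List Int) (remaining : List String) (best : String × Int) : String × Int :=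
  match is_ with
  | [] => best
  | i :: rest =>
    if remaining.isEmpty then best
    else
      match remaining.filter (fun n => PySem.Chars.startswith (ad.toList.drop i.toNat) n.toList) with
      | [] => pvBLoop ad rest remaining best
      | hh :: ht => pvBLoop ad rest (remaining.filter (fun n => !((hh :: ht).contains n))) (hh, i)

def find_last_mentioned_company_alt (ad : String) (company_names : List String) : String × Int :=
  pvBLoop ad (PySem.List.pyRange 0 (PySem.Str.len ad + 1) 1) company_names ("", -1)

-- ===== PRECONDITION & SPEC =====
def Spec_find_last_mentioned_company (ad : String) (company_names : List String) (out : String × Int) : Prop := out = find_last_mentioned_company_alt ad company_names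
instance (ad : String) (company_names : List String) (out : String × Int) : Decidable (Spec_find_last_mentioned_company ad company_names out) := by unfold Spec_find_last_mentioned_company; infer_instance

-- ===== CLAIM (what is proved, stated in full; the proofs are below) =====
def Claim_equal_find_last_mentioned_company : Prop := ∀ (ad : String) (company_names : List String), Dom_find_last_mentioned_company ad company_names → Spec_find_last_mentioned_company ad company_names (find_last_mentioned_company ad company_names)

-- ===== LEMMAS AND PROOFS =====

-- Both programs compute `pvSel ad names ("", -1)`: the pair (first name attaining the
-- maximal first-occurrence index, that index), or the accumulator if nothing improves it.
def pvMaxf (ad : String) (l : List String) (c : Int) : Int :=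
  List.foldl (fun m n => max m (PySem.Str.find ad n)) c l

def pvSel (ad : String) (l : List String) (b : String × Int) : String × Int :=
  match List.find? (fun n => decide (b.2 < PySem.Str.find ad n) && decide (PySem.Str.find ad n = pvMaxf ad l b.2)) l with
  | none => b
  | some m => (m, pvMaxf ad l b.2)

lemma pvMaxf_cons (ad : String) (n : String) (l : List String) (c : Int) :
    pvMaxf ad (n :: l) c = pvMaxf ad l (max c (PySem.Str.find ad n)) := rfl

lemma pvSel_nil (ad : String) (b : String × Int) : pvSel ad [] b = b := rfl

lemma pvMaxf_seed_le (ad : String) (l : List String) (c : Int) : c ≤ pvMaxf ad l c := by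
  induction l generalizing c with
  | nil => simp [pvMaxf]
  | cons n l ih =>
    rw [pvMaxf_cons]
    exact le_trans (le_max_left _ _) (ih _)

lemma pvMaxf_le_of_mem (ad : String) {l : List String} {n : String} (h : n ∈ l) (c : Int) :
    PySem.Str.find ad n ≤ pvMaxf ad l c := by
  induction l generalizing c with
  | nil => cases h
  | cons m l ih =>
    rw [pvMaxf_cons]
    rcases List.mem_cons.mp h with rfl | h'
    · exact le_trans (le_max_right _ _) (pvMaxf_seed_le _ _ _)
    · exact ih h' _

lemma pvMaxf_attained (ad : String) {l : List String} {c : Int}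
    (h : c < pvMaxf ad l c) : ∃ n ∈ l, PySem.Str.find ad n = pvMaxf ad l c := by
  induction l generalizing c with
  | nil => simp [pvMaxf] at h
  | cons n l ih =>
    rw [pvMaxf_cons] at h ⊢
    by_cases hc : max c (PySem.Str.find ad n) < pvMaxf ad l (max c (PySem.Str.find ad n))
    · obtain ⟨m, hm, hme⟩ := ih hc
      exact ⟨m, List.mem_cons_of_mem _ hm, hme⟩
    · have := pvMaxf_seed_le ad l (max c (PySem.Str.find ad n))
      have heq : pvMaxf ad l (max c (PySem.Str.find ad n)) = max c (PySem.Str.find ad n) := by omega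
      refine ⟨n, List.mem_cons_self .., ?_⟩
      rw [heq]; omega

lemma pvA_char (ad : String) (l : List String) : ∀ b : String × Int,
    List.foldl (pvStepA ad) b l = pvSel ad l b := by
  induction l with
  | nil => intro b; simp [pvSel_nil]
  | cons n l ih =>
    intro b
    rw [List.foldl_cons, ih]
    unfold pvStepA pvSel
    simp only [pvMaxf_cons, List.find?_cons]
    by_cases hbn : b.2 < PySem.Str.find ad n
    · rw [if_pos (by exact hbn)]
      simp only [max_eq_right hbn.le]
      by_cases hM : pvMaxf ad l (PySem.Str.find ad n) = PySem.Str.find ad n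
      · -- n itself is the (first) maximizer
        have hnone : List.find? (fun m => decide ((n, PySem.Str.find ad n).2 < PySem.Str.find ad m) &&
            decide (PySem.Str.find ad m = pvMaxf ad l (n, PySem.Str.find ad n).2)) l = none := by
          rw [List.find?_eq_none]
          intro m hm
          have := pvMaxf_le_of_mem ad hm (PySem.Str.find ad n)
          simp only [Bool.and_eq_true, decide_eq_true_eq, not_and]
          intro hlt
          rw [hM] at this ⊢
          omega
        rw [hnone]
        have hpn : (decide (b.2 < PySem.Str.find ad n) &&
            decide (PySem.Str.find ad n = pvMaxf ad l (PySem.Str.find ad n))) = true := by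
          simp only [Bool.and_eq_true, decide_eq_true_eq]
          exact ⟨hbn, hM.symm⟩
        rw [hpn, hM]
      · -- the maximum is attained strictly inside l
        have hlt : PySem.Str.find ad n < pvMaxf ad l (PySem.Str.find ad n) := by
          have := pvMaxf_seed_le ad l (PySem.Str.find ad n)
          omega
        have hpred : (fun m => decide ((n, PySem.Str.find ad n).2 < PySem.Str.find ad m) &&
              decide (PySem.Str.find ad m = pvMaxf ad l (n, PySem.Str.find ad n).2)) =
            (fun m => decide (b.2 < PySem.Str.find ad m) &&
              decide (PySem.Str.find ad m = pvMaxf ad l (PySem.Str.find ad n))) := by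
          funext m
          by_cases hm : PySem.Str.find ad m = pvMaxf ad l (PySem.Str.find ad n)
          · simp only [hm, decide_true, Bool.and_true]
            simp only [decide_eq_decide]
            omega
          · rw [decide_eq_false hm, Bool.and_false, Bool.and_false]
        rw [hpred]
        have hpn : (decide (b.2 < PySem.Str.find ad n) &&
            decide (PySem.Str.find ad n = pvMaxf ad l (PySem.Str.find ad n))) = false := by
          simp only [Bool.and_eq_false_iff, decide_eq_false_iff_not]
          right; exact fun h => hM h.symm
        rw [hpn]
        obtain ⟨m0, hm0, hm0e⟩ := pvMaxf_attained ad hlt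
        cases hfind : List.find? (fun m => decide (b.2 < PySem.Str.find ad m) &&
            decide (PySem.Str.find ad m = pvMaxf ad l (PySem.Str.find ad n))) l with
        | none =>
          exfalso
          rw [List.find?_eq_none] at hfind
          exact hfind m0 hm0 (by simp only [Bool.and_eq_true, decide_eq_true_eq]; exact ⟨by omega, hm0e⟩)
        | some m => rfl
    · rw [if_neg (by exact hbn)]
      simp only [max_eq_left (show PySem.Str.find ad n ≤ b.2 by omega)]
      have hpn : (decide (b.2 < PySem.Str.find ad n) &&
          decide (PySem.Str.find ad n = pvMaxf ad l b.2)) = false := by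
        simp only [Bool.and_eq_false_iff, decide_eq_false_iff_not]
        left; exact hbn
      rw [hpn]

lemma pvMaxf_le_bound (ad : String) {l : List String} {c d : Int}
    (h : ∀ n ∈ l, PySem.Str.find ad n ≤ d) (hc : c ≤ d) : pvMaxf ad l c ≤ d := by
  induction l generalizing c with
  | nil => simpa [pvMaxf]
  | cons n l ih =>
    rw [pvMaxf_cons]
    exact ih (fun m hm => h m (List.mem_cons_of_mem _ hm))
      (max_le hc (h n (List.mem_cons_self ..)))

lemma pvSel_stuck (ad : String) {R : List String} {b : String × Int}
    (h : ∀ n ∈ R, PySem.Str.find ad n ≤ b.2) : pvSel ad R b = b := by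
  unfold pvSel
  have hnone : List.find? (fun n => decide (b.2 < PySem.Str.find ad n) &&
      decide (PySem.Str.find ad n = pvMaxf ad R b.2)) R = none := by
    rw [List.find?_eq_none]
    intro n hn
    simp only [Bool.and_eq_true, decide_eq_true_eq, not_and]
    intro hlt
    exact absurd hlt (not_lt.mpr (h n hn))
  rw [hnone]

lemma pvFind?_of_filter_cons {α : Type} {p : α → Bool} {l xs : List α} {x : α}
    (h : l.filter p = x :: xs) : l.find? p = some x := by
  induction l with
  | nil => simp at h
  | cons a l ih =>
    rw [List.filter_cons] at h
    rw [List.find?_cons]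
    by_cases hp : p a
    · rw [if_pos hp] at h
      cases h
      rw [hp]
    · rw [if_neg hp] at h
      rw [Bool.not_eq_true] at hp
      rw [hp]
      exact ih h

lemma pvBLoop_cons (ad : String) (i : Int) (rest : List Int) (R : List String) (b : String × Int) :
    pvBLoop ad (i :: rest) R b =
      if R.isEmpty then b
      else
        match R.filter (fun n => PySem.Chars.startswith (ad.toList.drop i.toNat) n.toList) with
        | [] => pvBLoop ad rest R b
        | hh :: ht => pvBLoop ad rest (R.filter (fun n => !((hh :: ht).contains n))) (hh, i) := rfl

lemma pvStarts_iff (ad n : String) (i : Int) (hi : 0 ≤ i)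
    (hn : PySem.Str.find ad n = -1 ∨ i ≤ PySem.Str.find ad n) :
    (PySem.Chars.startswith (ad.toList.drop i.toNat) n.toList = true ↔ PySem.Str.find ad n = i) := by
  rw [PySem.Str.find_eq] at hn ⊢
  rw [PySem.Chars.startswith_iff]
  rcases hn with hn | hn
  · have hni := (PySem.Chars.find_eq_neg_one_iff ad.toList n.toList).mp hn
    constructor
    · intro hpre
      exact absurd (hpre.isInfix.trans (List.drop_suffix _ _).isInfix) hni
    · intro h; omega
  · have h0 : 0 ≤ PySem.Chars.find ad.toList n.toList := by omega
    obtain ⟨hat, hmin⟩ := PySem.Chars.find_spec h0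
    constructor
    · intro hpre
      have : ¬ i.toNat < (PySem.Chars.find ad.toList n.toList).toNat := fun hlt => hmin _ hlt hpre
      omega
    · intro h
      rw [h] at hat
      exact hat

lemma pvBinv_end (ad : String) (names : List String) (i : Int) (R : List String) (b : String × Int)
    (hb1 : -1 ≤ b.2) (hiL : PySem.Str.len ad + 1 ≤ i)
    (hR : R = names.filter (fun n => decide ¬(0 ≤ PySem.Str.find ad n ∧ PySem.Str.find ad n < i))) :
    pvSel ad R b = b := by
  apply pvSel_stuck
  intro n hn
  rw [hR] at hn
  have hp := List.of_mem_filter hn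
  simp only [decide_eq_true_eq] at hp
  have h1 := PySem.Chars.neg_one_le_find ad.toList n.toList
  have h2 := PySem.Chars.find_le_length ad.toList n.toList
  rw [PySem.Str.find_eq] at hp ⊢
  rw [PySem.Str.len_eq] at hiL
  omega

lemma pvBinv (ad : String) (names : List String) : ∀ (t : Nat) (i : Int) (R : List String) (b : String × Int),
    0 ≤ i → -1 ≤ b.2 → b.2 < i →
    (PySem.Str.len ad + 1 - i).toNat ≤ t →
    R = names.filter (fun n => decide ¬(0 ≤ PySem.Str.find ad n ∧ PySem.Str.find ad n < i)) →
    pvBLoop ad (PySem.List.pyRange i (PySem.Str.len ad + 1) 1) R b = pvSel ad R b := by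
  intro t
  induction t with
  | zero =>
    intro i R b hi hb1 hb2 ht hR
    have hiL : PySem.Str.len ad + 1 ≤ i := by
      rw [PySem.Str.len_eq] at ht ⊢
      omega
    rw [PySem.List.pyRange_one_eq_nil hiL, pvBinv_end ad names i R b hb1 hiL hR]
    rfl
  | succ t ihT =>
    intro i R b hi hb1 hb2 ht hR
    by_cases hiL : PySem.Str.len ad + 1 ≤ i
    · rw [PySem.List.pyRange_one_eq_nil hiL, pvBinv_end ad names i R b hb1 hiL hR]
      rfl
    · rw [not_le] at hiL
      rw [PySem.List.pyRange_one_cons hiL, pvBLoop_cons]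
      by_cases hRe : R.isEmpty
      · rw [if_pos hRe, List.isEmpty_iff.mp hRe, pvSel_nil]
      · rw [if_neg hRe]
        have hmem : ∀ n ∈ R, PySem.Str.find ad n = -1 ∨ i ≤ PySem.Str.find ad n := by
          intro n hn
          rw [hR] at hn
          have hp := List.of_mem_filter hn
          simp only [decide_eq_true_eq] at hp
          have h1 := PySem.Chars.neg_one_le_find ad.toList n.toList
          rw [PySem.Str.find_eq] at hp ⊢
          omega
        have hfe : R.filter (fun n => PySem.Chars.startswith (ad.toList.drop i.toNat) n.toList)
            = R.filter (fun n => decide (PySem.Str.find ad n = i)) := by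
          apply List.filter_congr
          intro n hn
          have hiff := pvStarts_iff ad n i hi (hmem n hn)
          exact Bool.eq_iff_iff.mpr (by rw [decide_eq_true_eq]; exact hiff)
        rw [hfe]
        cases hhits : R.filter (fun n => decide (PySem.Str.find ad n = i)) with
        | nil =>
          have hnonames : ∀ n ∈ names, ¬ PySem.Str.find ad n = i := by
            intro n hn hni
            have hnR : n ∈ R := by
              rw [hR]
              exact List.mem_filter.mpr ⟨hn, by simp only [decide_eq_true_eq]; omega⟩
            have hmemf : n ∈ R.filter (fun n => decide (PySem.Str.find ad n = i)) :=
              List.mem_filter.mpr ⟨hnR, by simp only [decide_eq_true_eq]; exact hni⟩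
            rw [hhits] at hmemf
            cases hmemf
          refine ihT (i+1) R b (by omega) hb1 (by omega) ?_ ?_
          · rw [PySem.Str.len_eq] at ht ⊢
            omega
          · rw [hR]
            apply List.filter_congr
            intro n hn
            rw [decide_eq_decide]
            have := hnonames n hn
            omega
        | cons hh ht2 =>
          have hhmemf : hh ∈ R.filter (fun n => decide (PySem.Str.find ad n = i)) := by
            rw [hhits]; exact List.mem_cons_self ..
          have hhR : hh ∈ R := List.mem_of_mem_filter hhmemf
          have hhF : PySem.Str.find ad hh = i := by
            have := List.of_mem_filter hhmemf
            simpa only [decide_eq_true_eq] using this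
          have hhitsF : ∀ x ∈ (hh :: ht2), PySem.Str.find ad x = i := by
            intro x hx
            rw [← hhits] at hx
            have := List.of_mem_filter hx
            simpa only [decide_eq_true_eq] using this
          have h1 : R.filter (fun n => !((hh :: ht2).contains n))
              = R.filter (fun n => decide ¬(PySem.Str.find ad n = i)) := by
            apply List.filter_congr
            intro n hn
            by_cases hni : PySem.Str.find ad n = i
            · have hmm : n ∈ hh :: ht2 := by
                rw [← hhits]
                exact List.mem_filter.mpr ⟨hn, by simp only [decide_eq_true_eq]; exact hni⟩
              rw [List.contains_iff_mem.mpr hmm]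
              rw [decide_eq_false (not_not_intro hni)]
              rfl
            · have hnm : n ∉ hh :: ht2 := fun hmm => hni (hhitsF n hmm)
              have hc : ¬ ((hh :: ht2).contains n = true) := fun h => hnm (List.contains_iff_mem.mp h)
              rw [Bool.not_eq_true] at hc
              rw [hc]
              rw [decide_eq_true hni]
              rfl
          have hRk2 : R.filter (fun n => decide ¬(PySem.Str.find ad n = i))
              = names.filter (fun n => decide ¬(0 ≤ PySem.Str.find ad n ∧ PySem.Str.find ad n < i+1)) := by
            rw [hR, List.filter_filter]
            apply List.filter_congr
            intro n hn
            rw [← Bool.decide_and, decide_eq_decide]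
            omega
          dsimp only
          rw [h1, hRk2]
          rw [ihT (i+1) (names.filter (fun n => decide ¬(0 ≤ PySem.Str.find ad n ∧ PySem.Str.find ad n < i+1)))
            (hh, i) (by omega) (by simp; omega) (by simp)
            (by rw [PySem.Str.len_eq] at ht ⊢; omega) rfl]
          -- remaining: pvSel ad R' (hh, i) = pvSel ad R b
          have hMge : i ≤ pvMaxf ad R b.2 := hhF ▸ pvMaxf_le_of_mem ad hhR b.2
          by_cases hMi : pvMaxf ad R b.2 = i
          · -- the maximum first-occurrence index is i itself: hh wins
            have hstuck : pvSel ad (names.filter (fun n => decide ¬(0 ≤ PySem.Str.find ad n ∧ PySem.Str.find ad n < i+1)))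
                (hh, i) = (hh, i) := by
              apply pvSel_stuck
              intro n hn
              rw [← hRk2] at hn
              have := pvMaxf_le_of_mem ad (List.mem_of_mem_filter hn) b.2
              simp only
              omega
            rw [hstuck]
            have hpred1 : (fun n => decide (b.2 < PySem.Str.find ad n) &&
                decide (PySem.Str.find ad n = pvMaxf ad R b.2)) = (fun n => decide (PySem.Str.find ad n = i)) := by
              funext n
              simp only [hMi]
              by_cases h : PySem.Str.find ad n = i
              · rw [h]
                simp [hb2]
              · rw [decide_eq_false h, Bool.and_false]
            unfold pvSel
            rw [hpred1, pvFind?_of_filter_cons hhits, hMi]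
          · have hMlt : i < pvMaxf ad R b.2 := by omega
            obtain ⟨m0, hm0R, hm0F⟩ := pvMaxf_attained ad (show b.2 < pvMaxf ad R b.2 by omega)
            have hm0R' : m0 ∈ R.filter (fun n => decide ¬(PySem.Str.find ad n = i)) :=
              List.mem_filter.mpr ⟨hm0R, by simp only [decide_eq_true_eq]; omega⟩
            have hM' : pvMaxf ad (names.filter (fun n => decide ¬(0 ≤ PySem.Str.find ad n ∧ PySem.Str.find ad n < i+1))) i
                = pvMaxf ad R b.2 := by
              apply le_antisymm
              · apply pvMaxf_le_bound
                · intro n hn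
                  rw [← hRk2] at hn
                  exact pvMaxf_le_of_mem ad (List.mem_of_mem_filter hn) b.2
                · omega
              · rw [← hRk2]
                calc pvMaxf ad R b.2 = PySem.Str.find ad m0 := hm0F.symm
                  _ ≤ _ := pvMaxf_le_of_mem ad hm0R' i
            have hpredR : (fun n => decide (b.2 < PySem.Str.find ad n) &&
                decide (PySem.Str.find ad n = pvMaxf ad R b.2)) =
                (fun n => decide (PySem.Str.find ad n = pvMaxf ad R b.2)) := by
              funext n
              by_cases h : PySem.Str.find ad n = pvMaxf ad R b.2
              · rw [h]
                simp [show b.2 < pvMaxf ad R b.2 by omega]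
              · rw [decide_eq_false h, Bool.and_false]
            have hpredR' : (fun n => decide ((hh, i).2 < PySem.Str.find ad n) &&
                decide (PySem.Str.find ad n = pvMaxf ad (names.filter (fun n => decide ¬(0 ≤ PySem.Str.find ad n ∧ PySem.Str.find ad n < i+1))) i)) =
                (fun n => decide (PySem.Str.find ad n = pvMaxf ad R b.2)) := by
              funext n
              simp only [hM']
              by_cases h : PySem.Str.find ad n = pvMaxf ad R b.2
              · rw [h]
                simp [show i < pvMaxf ad R b.2 by omega]
              · rw [decide_eq_false h, Bool.and_false]
            unfold pvSel
            rw [hpredR, hpredR', hM', ← hRk2, List.find?_filter]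
            have hpp : (fun a => decide ((decide ¬(PySem.Str.find ad a = i)) = true ∧
                (decide (PySem.Str.find ad a = pvMaxf ad R b.2)) = true)) =
                (fun n => decide (PySem.Str.find ad n = pvMaxf ad R b.2)) := by
              funext n
              by_cases h : PySem.Str.find ad n = pvMaxf ad R b.2
              · rw [h]
                simp [hMi]
              · rw [decide_eq_false h]
                simp
            rw [hpp]
            cases hf : List.find? (fun n => decide (PySem.Str.find ad n = pvMaxf ad R b.2)) R with
            | none =>
              exfalso
              rw [List.find?_eq_none] at hf
              exact hf m0 hm0R (by simp only [decide_eq_true_eq]; exact hm0F)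
            | some m => rfl

-- ===== VERDICT (by name: the statement is the Claim_ definition above) =====
theorem find_last_mentioned_company_spec : Claim_equal_find_last_mentioned_company := by
  intro ad names _
  unfold Spec_find_last_mentioned_company find_last_mentioned_company find_last_mentioned_company_alt
  rw [pvA_char]
  have h0 : names.filter (fun n => decide ¬(0 ≤ PySem.Str.find ad n ∧ PySem.Str.find ad n < 0)) = names := by
    rw [List.filter_congr (q := fun _ => true) (by intro n _; simp only [decide_eq_true_eq]; omega), List.filter_true]
  exact (pvBinv ad names (PySem.Str.len ad + 1).toNat 0 names ("", -1) (by omega) (by norm_num)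
    (by norm_num) (by omega) h0.symm).symm
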